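-- pv_equiv track=rewrite | github.com/hvdthong/Concept_Graph | graph_construct.py | converting_structured_for_title_section
-- ===== SOURCE A (Python) =====
-- def converting_structured_for_title_section(data):
--     courses = data.keys()
--     concepts = list()
--     for k in data.keys():
--         concepts = data[k]
--         break
--
--     new_dict = dict()
--     for concept in concepts:
--         new_course = list()
--         for course in courses:
--             if data[course][concept] == True:
--                 new_course.append(course)
--         new_dict[concept] = new_course
--     return new_dict
-- ===== SOURCE B (Python) =====
-- def converting_structured_for_title_section(data):
--     # concepts come from the first course's sub-dict only, as in the original
--     if data:
--         concepts = list(next(iter(data.values())))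
--     else:
--         concepts = []
--     # stage 1: flatten the table into a stream of (concept, course) "true cells",
--     # read off each course's own sub-dict entries
--     events = [(c, course) for course, sub in data.items() for c, v in sub.items() if v == True]
--     # stage 2: group the stream by concept (cells for unknown concepts are dropped)
--     out = {c: [] for c in concepts}
--     for c, course in events:
--         if c in out:
--             out[c].append(course)
--     return out
-- ===== Notes on version B (the rewrite author's own statement) =====
-- stated objective: alternative
-- what changed: B replaces A's per-concept gather (for each concept, scan all courses and look each one up through data[course][concept]) by a two-stage flatten-and-group: it first flattens the table into one flat stream of (concept, course) cells whose value is True by iterating each course's own sub-dict entries (no per-cell dict lookups), then groups that stream by concept into pre-initialised lists, dropping cells whose concept is not in the first course's concept set.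
import Mathlib
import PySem

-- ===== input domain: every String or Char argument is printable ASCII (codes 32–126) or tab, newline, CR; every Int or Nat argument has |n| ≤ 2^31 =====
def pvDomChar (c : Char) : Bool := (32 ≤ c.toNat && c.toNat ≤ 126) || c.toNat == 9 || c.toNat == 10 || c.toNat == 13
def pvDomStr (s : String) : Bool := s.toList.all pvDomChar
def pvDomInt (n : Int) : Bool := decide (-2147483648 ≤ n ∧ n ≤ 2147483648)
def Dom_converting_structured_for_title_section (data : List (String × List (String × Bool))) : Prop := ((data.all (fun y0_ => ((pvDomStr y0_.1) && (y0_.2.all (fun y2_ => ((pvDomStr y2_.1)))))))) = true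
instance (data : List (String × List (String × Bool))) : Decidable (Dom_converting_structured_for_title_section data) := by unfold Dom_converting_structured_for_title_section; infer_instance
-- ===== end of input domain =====

-- B replaces A's per-concept gather (nested scan with a data[course][concept] lookup per cell)
-- by a two-stage flatten-and-group: flatten the table into one stream of true (concept, course)
-- cells read off each course's own entries, then group that stream by concept (objective:
-- alternative decomposition).

-- ===== PORT A =====
def converting_structured_for_title_section (data : List (String × List (String × Bool))) : List (String × List String) :=
  -- courses = data.keys()
  let courses : List String := data.map (·.1)
  -- for k in data.keys(): concepts = data[k]; break   (iterated later as its keys)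
  let concepts : List String :=
    match data with
    | [] => []
    | p :: _ => p.2.map (·.1)
  -- new_dict = dict(); for concept in concepts: … new_dict[concept] = new_course
  (concepts.foldl (fun nd concept =>
      nd.insert concept
        -- new_course = []; for course in courses: if data[course][concept] == True: append
        (courses.foldl (fun acc course =>
            if (PySem.Dict.mk ((PySem.Dict.mk data).getD course [])).getD concept false == true
            then acc ++ [course] else acc) ([] : List String)))
    (PySem.Dict.empty : PySem.Dict String (List String))).items

-- ===== PORT B =====
def converting_structured_for_title_section_alt (data : List (String × List (String × Bool))) : List (String × List String) :=
  -- concepts = list(next(iter(data.values()))) if data else []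
  let concepts : List String :=
    match data with
    | [] => []
    | p :: _ => p.2.map (·.1)
  -- events = [(c, course) for course, sub in data.items() for c, v in sub.items() if v == True]
  let events : List (String × String) :=
    data.flatMap (fun p => (p.2.filter (fun r => r.2 == true)).map (fun r => (r.1, p.1)))
  -- out = {c: [] for c in concepts}
  let init : PySem.Dict String (List String) :=
    concepts.foldl (fun d c => d.insert c ([] : List String)) PySem.Dict.empty
  -- for c, course in events: if c in out: out[c].append(course)
  (events.foldl (fun d e =>
      if d.contains e.1 then d.modify e.1 ([] : List String) (· ++ [e.2]) else d) init).items

-- ===== PRECONDITION & SPEC =====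
-- Pre_ (a) requires the outer and each inner association list to have distinct keys (a Python
-- dict cannot carry duplicate keys, so only such lists represent an input of A), and (b) excludes
-- the inputs on which A raises KeyError: some course's sub-dict missing a concept of the first
-- course's sub-dict.
-- the concept list A reads off the first course's sub-dict (used by Pre_/Raises_ only)
def pvConceptsOf (data : List (String × List (String × Bool))) : List String :=
  match data with
  | [] => []
  | p :: _ => p.2.map (·.1)

def Pre_converting_structured_for_title_section (data : List (String × List (String × Bool))) : Prop :=
  (data.map (·.1)).Nodup ∧ (∀ p ∈ data, (p.2.map (fun r => (r.1 : String))).Nodup) ∧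
  (∀ p ∈ data, ∀ c ∈ pvConceptsOf data, c ∈ p.2.map (fun r => (r.1 : String)))
instance (data : List (String × List (String × Bool))) : Decidable (Pre_converting_structured_for_title_section data) := by
  unfold Pre_converting_structured_for_title_section; infer_instance

def pvWitness_converting_structured_for_title_section : (List (String × List (String × Bool))) :=
  [("cs101", [("loops", true), ("graphs", false)]), ("cs102", [("graphs", true), ("loops", true)])]

def Spec_converting_structured_for_title_section (data : List (String × List (String × Bool))) (out : List (String × List String)) : Prop := out = converting_structured_for_title_section_alt data
instance (data : List (String × List (String × Bool))) (out : List (String × List String)) : Decidable (Spec_converting_structured_for_title_section data out) := by unfold Spec_converting_structured_for_title_section; infer_instance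

-- ===== CLAIM (what is proved, stated in full; the proofs are below) =====
def Claim_equal_converting_structured_for_title_section : Prop := ∀ (data : List (String × List (String × Bool))), Dom_converting_structured_for_title_section data → Pre_converting_structured_for_title_section data → Spec_converting_structured_for_title_section data (converting_structured_for_title_section data)
-- ===== LEMMAS AND PROOFS =====

-- 'data[course][concept] == True' as a predicate of the course's own pair (sub looked up directly)
def lkB (sub : List (String × Bool)) (c : String) : Bool :=
  (PySem.Dict.mk sub).getD c false == true

-- a dict with given nodup keys and given lookups has exactly this items list
theorem items_eq_map {ν : Type} (d : PySem.Dict String ν) (cs : List String) (g : String → ν)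
    (hk : d.keys = cs) (hn : cs.Nodup) (hg : ∀ c ∈ cs, d.get? c = some (g c)) :
    d.items = cs.map (fun c => (c, g c)) := by
  apply List.ext_getElem
  · have hlen := congrArg List.length hk
    simpa [PySem.Dict.keys] using hlen
  · intro i h1 h2
    have hcs : i < cs.length := by simpa using h2
    have hmem : d.items[i] ∈ d.items := List.getElem_mem _
    have hget : d.get? (d.items[i].1) = some (d.items[i].2) :=
      PySem.Dict.get?_of_mem_items d (by simp [hmem]) (hk ▸ hn)
    have h3 : i < d.keys.length := by simpa [PySem.Dict.keys] using h1
    have hfst : (d.items[i]).1 = cs[i] := by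
      have := List.getElem_of_eq hk h3
      simpa [PySem.Dict.keys] using this
    rw [hfst] at hget
    rw [hg _ (List.getElem_mem hcs)] at hget
    simp only [List.getElem_map]
    exact Prod.ext hfst (by simpa using hget.symm)

-- B's grouping loop leaves the key list unchanged (it only modifies contained keys)
theorem keys_groupFold (events : List (String × String)) (d : PySem.Dict String (List String)) :
    (events.foldl (fun d e => if d.contains e.1 then d.modify e.1 ([] : List String) (· ++ [e.2]) else d) d).keys = d.keys := by
  induction events generalizing d with
  | nil => rfl
  | cons e es ih =>
    simp only [List.foldl_cons]
    by_cases h : d.contains e.1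
    · rw [if_pos h, ih, PySem.Dict.keys_modify, PySem.Dict.keys_insert_of_contains _ _ h]
    · rw [if_neg h, ih]

-- B's grouping loop: a contained concept's list accumulates that concept's events in order
theorem getD_groupFold (events : List (String × String)) (d : PySem.Dict String (List String))
    (c : String) (hc : d.contains c = true) :
    (events.foldl (fun d e => if d.contains e.1 then d.modify e.1 ([] : List String) (· ++ [e.2]) else d) d).getD c []
      = d.getD c [] ++ (events.filter (fun e => e.1 == c)).map (·.2) := by
  induction events generalizing d with
  | nil => simp
  | cons e es ih =>
    simp only [List.foldl_cons]
    by_cases he : e.1 = c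
    · subst he
      rw [if_pos hc]
      rw [ih _ (by rw [PySem.Dict.contains_modify]; simp)]
      rw [PySem.Dict.getD_modify_self]
      simp
    · by_cases hce : d.contains e.1
      · rw [if_pos hce]
        rw [ih _ (by rw [PySem.Dict.contains_modify]; simp [hc])]
        rw [PySem.Dict.getD_modify, if_neg (fun hh => he hh.symm)]
        simp [he]
      · rw [if_neg hce, ih _ hc]
        simp [he]

-- c has no entries in a sub-list not containing key c
theorem filter_key_nil (rs : List (String × Bool)) (c : String)
    (h : c ∉ rs.map (fun r => (r.1 : String))) :
    rs.filter (fun r => r.2 == true && r.1 == c) = [] := by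
  rw [List.filter_eq_nil_iff]
  intro r hr hb
  exact h (by
    have : r.1 = c := by
      have := (Bool.and_eq_true _ _).mp hb
      simpa using this.2
    rw [← this]; exact List.mem_map_of_mem hr)

-- for a sub-dict with distinct keys, the true cells at concept c are [(c, true)] iff the lookup says True
theorem cell_eq (sub : List (String × Bool)) (hnd : (sub.map (fun r => (r.1 : String))).Nodup) (c : String) :
    sub.filter (fun r => r.2 == true && r.1 == c) = if lkB sub c then [(c, true)] else [] := by
  induction sub with
  | nil => simp [lkB, PySem.Dict.getD_eq_get?_getD, PySem.Dict.get?]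
  | cons r rs ih =>
    obtain ⟨k, v⟩ := r
    simp only [List.map_cons, List.nodup_cons] at hnd
    have hlk : lkB ((k, v) :: rs) c = if k == c then v == true else lkB rs c := by
      simp only [lkB, PySem.Dict.getD_eq_get?_getD, PySem.Dict.get?_mk_cons]
      by_cases h : k == c <;> simp [h]
    by_cases h : k = c
    · subst h
      have hnil := filter_key_nil rs k hnd.1
      rw [hlk]
      have hno : ∀ a : String, (a, true) ∈ rs → ¬a = k := by
        intro a ha hak
        exact hnd.1 (hak ▸ List.mem_map_of_mem ha)
      cases v
      · simp only [List.filter_cons]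
        simpa using hno
      · simp only [List.filter_cons]
        simpa using hno
    · have hhead : ((v == true && k == c) : Bool) = false := by simp [h]
      simp only [List.filter_cons, hhead, Bool.false_eq_true, if_false]
      rw [ih hnd.2, hlk]
      simp [h]

-- the grouped stream at concept c equals A's per-concept filter over the courses
theorem group_eq (data : List (String × List (String × Bool)))
    (hsubn : ∀ p ∈ data, (p.2.map (fun r => (r.1 : String))).Nodup) (c : String) :
    ((data.flatMap (fun p => (p.2.filter (fun r => r.2 == true)).map (fun r => (r.1, p.1)))).filter
        (fun e => e.1 == c)).map (·.2)
      = (data.filter (fun p => lkB p.2 c)).map (·.1) := by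
  induction data with
  | nil => rfl
  | cons p rest ih =>
    simp only [List.flatMap_cons, List.filter_append, List.map_append, List.filter_cons]
    rw [ih (fun q hq => hsubn q (by simp [hq]))]
    have hpiece : (((p.2.filter (fun r => r.2 == true)).map (fun r => (r.1, p.1))).filter
        (fun e => e.1 == c)).map (fun e : String × String => e.2)
        = if lkB p.2 c then [p.1] else [] := by
      rw [List.filter_map, List.map_map]
      have hff : (p.2.filter (fun r => r.2 == true)).filter
          ((fun e : String × String => e.1 == c) ∘ (fun r : String × Bool => (r.1, p.1)))
          = p.2.filter (fun r => r.2 == true && r.1 == c) := by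
        rw [List.filter_filter]
        apply List.filter_congr
        intro a _
        simp [Function.comp, Bool.and_comm]
      rw [hff, cell_eq p.2 (hsubn p (by simp)) c]
      by_cases hb : lkB p.2 c <;> simp [hb]
    rw [hpiece]
    by_cases hb : lkB p.2 c <;> simp [hb]

-- A's inner course loop, with the data[course] lookup eliminated (outer keys distinct)
theorem gather_eq (data : List (String × List (String × Bool)))
    (hn : (data.map (·.1)).Nodup) (c : String) :
    (data.map (·.1)).foldl (fun acc course =>
        if lkB ((PySem.Dict.mk data).getD course []) c
        then acc ++ [course] else acc) []
      = (data.filter (fun p => lkB p.2 c)).map (·.1) := by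
  rw [PySem.List.foldl_append_if_eq_filter, List.nil_append, List.filter_map]
  apply congrArg
  apply List.filter_congr
  intro p hp
  have hsub : (PySem.Dict.mk data).getD p.1 [] = p.2 :=
    PySem.Dict.getD_of_mem_items (PySem.Dict.mk data) (by exact hp) (by rw [PySem.Dict.keys_mk]; exact hn) []
  simp [Function.comp, hsub, lkB]

theorem get?_eq_some_getD (d : PySem.Dict String (List String)) (c : String) (hc : c ∈ d.keys) :
    d.get? c = some (d.getD c []) := by
  have hcont : d.contains c = true := (PySem.Dict.contains_iff_mem_keys d c).mpr hc
  rw [PySem.Dict.contains_eq_isSome_get?] at hcont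
  cases hopt : d.get? c with
  | none => rw [hopt] at hcont; simp at hcont
  | some v => rw [PySem.Dict.getD_eq_get?_getD, hopt]; rfl

theorem converting_structured_for_title_section_main
    (data : List (String × List (String × Bool)))
    (h : Pre_converting_structured_for_title_section data) :
    converting_structured_for_title_section data = converting_structured_for_title_section_alt data := by
  obtain ⟨hn, hsubn, hcov⟩ := h
  cases data with
  | nil => rfl
  | cons p0 rest =>
    have hndc : (p0.2.map (·.1) : List String).Nodup := hsubn p0 (by simp)
    simp only [converting_structured_for_title_section, converting_structured_for_title_section_alt]
    have hlk : ∀ (sub : List (String × Bool)) (c : String),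
        ((PySem.Dict.mk sub).getD c false == true) = lkB sub c := fun _ _ => rfl
    simp only [hlk]
    -- A side
    rw [PySem.Dict.items_foldl_insert_fresh (p0.2.map (·.1)) (fun c => c)
          (fun concept => (((p0 :: rest).map (·.1)).foldl (fun acc course =>
              if lkB ((PySem.Dict.mk (p0 :: rest)).getD course []) concept
              then acc ++ [course] else acc) ([] : List String)))
          PySem.Dict.empty
          (fun a _ => PySem.Dict.contains_empty a) (by simpa using hndc)]
    rw [show (PySem.Dict.empty : PySem.Dict String (List String)).items = [] from rfl, List.nil_append]
    rw [List.map_congr_left (fun c _ => by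
      rw [gather_eq (p0 :: rest) hn c] :
      ∀ c ∈ p0.2.map (·.1), _ = (fun c => (c, ((p0 :: rest).filter (fun p => lkB p.2 c)).map (·.1))) c)]
    -- B side
    have hinit : (((p0.2.map (·.1)) : List String).foldl (fun d c => d.insert c ([] : List String)) PySem.Dict.empty).items
        = (p0.2.map (·.1)).map (fun c => (c, ([] : List String))) := by
      rw [PySem.Dict.items_foldl_insert_fresh (p0.2.map (·.1)) (fun c => c) (fun _ => ([] : List String))
            PySem.Dict.empty (fun a _ => PySem.Dict.contains_empty a) (by simpa using hndc)]
      rfl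
    have hkinit : (((p0.2.map (·.1)) : List String).foldl (fun d c => d.insert c ([] : List String)) PySem.Dict.empty).keys
        = p0.2.map (·.1) := by
      simp [PySem.Dict.keys, hinit]
    refine (items_eq_map _ (p0.2.map (·.1))
        (fun c => ((p0 :: rest).filter (fun p => lkB p.2 c)).map (·.1)) ?_ hndc ?_).symm
    · rw [keys_groupFold, hkinit]
    · intro c hc
      have hcont : (((p0.2.map (·.1)) : List String).foldl (fun d c => d.insert c ([] : List String)) PySem.Dict.empty).contains c = true := by
        apply (PySem.Dict.contains_iff_mem_keys _ _).mpr
        rw [hkinit]; exact hc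
      rw [get?_eq_some_getD _ c (by rw [keys_groupFold, hkinit]; exact hc)]
      congr 1
      have hinitgetD : (((p0.2.map (·.1)) : List String).foldl (fun d c => d.insert c ([] : List String)) PySem.Dict.empty).getD c [] = [] :=
        PySem.Dict.getD_of_mem_items _ (by rw [hinit]; exact List.mem_map_of_mem hc) (by rw [hkinit]; exact hndc) []
      rw [getD_groupFold _ _ c hcont, hinitgetD, List.nil_append]
      exact group_eq (p0 :: rest) hsubn c

-- ===== VERDICT (by name: the statement is the Claim_ definition above) =====
theorem converting_structured_for_title_section_spec : Claim_equal_converting_structured_for_title_section := by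
  intro data _ hpre
  unfold Spec_converting_structured_for_title_section
  exact converting_structured_for_title_section_main data hpre
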